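-- pv_equiv track=rewrite | github.com/afaan123/self_rag_seminar | critique_infer copy.py | extract_reflection_fields
-- ===== SOURCE A (Python) =====
-- REFLECTION_CATEGORIES = {
--     "Retrieve": ["[Retrieve:yes]", "[Retrieve:no]"],
--     "isREL": ["[Relevant]", "[Irrelevant]"],
--     "isSUP": ["[Fully supported]", "[Partially supported]", "[No support]"],
--     "isUSE": ["[Utility:1]", "[Utility:2]", "[Utility:3]", "[Utility:4]", "[Utility:5]"]
-- }
--
-- def extract_reflection_fields(tokens):
--     """Extract first token per category from generated output"""
--     results = {k: None for k in REFLECTION_CATEGORIES.keys()}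
--
--     for tok in tokens:
--         for key, valid_tokens in REFLECTION_CATEGORIES.items():
--             if results[key] is None and tok in valid_tokens:
--                 results[key] = tok
--
--     # Set defaults for any missing categories
--     for key in results:
--         if results[key] is None:
--             results[key] = "[UNK]"
--
--     return results
-- ===== SOURCE B (Python) =====
-- REFLECTION_CATEGORIES = {
--     "Retrieve": ["[Retrieve:yes]", "[Retrieve:no]"],
--     "isREL": ["[Relevant]", "[Irrelevant]"],
--     "isSUP": ["[Fully supported]", "[Partially supported]", "[No support]"],
--     "isUSE": ["[Utility:1]", "[Utility:2]", "[Utility:3]", "[Utility:4]", "[Utility:5]"]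
-- }
--
-- # inverted index: reflection token -> its category, built once at import time
-- TOKEN_TO_CATEGORY = {tok: key for key, toks in REFLECTION_CATEGORIES.items() for tok in toks}
--
-- def extract_reflection_fields(tokens):
--     """Extract first token per category from generated output"""
--     found = {}
--     for tok in tokens:
--         key = TOKEN_TO_CATEGORY.get(tok)
--         if key is not None and key not in found:
--             found[key] = tok
--     return {key: found.get(key, "[UNK]") for key in REFLECTION_CATEGORIES}
-- ===== Notes on version B (the rewrite author's own statement) =====
-- stated objective: alternative
-- what changed: Replaces A's per-token scan over every category's valid-token list (nested membership tests with four None slots plus a fill-defaults loop) by an inverted token-to-category hash index built once: one pass over tokens does a single O(1) dict lookup per token, recording the first hit per category, then the result is assembled in category order with [UNK] defaults.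
import Mathlib
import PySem

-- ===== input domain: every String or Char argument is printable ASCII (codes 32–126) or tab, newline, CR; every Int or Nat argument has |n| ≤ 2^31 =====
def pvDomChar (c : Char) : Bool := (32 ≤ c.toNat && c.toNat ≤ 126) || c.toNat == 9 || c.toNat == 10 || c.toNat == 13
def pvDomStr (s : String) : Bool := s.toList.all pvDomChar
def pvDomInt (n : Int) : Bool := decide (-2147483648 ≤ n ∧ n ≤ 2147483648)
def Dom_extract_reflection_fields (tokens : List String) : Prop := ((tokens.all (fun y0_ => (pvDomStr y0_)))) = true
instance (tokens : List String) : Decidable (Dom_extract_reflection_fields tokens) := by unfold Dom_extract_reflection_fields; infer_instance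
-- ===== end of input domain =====

-- B replaces A's per-token scan over each category's valid-token list by an inverted
-- token→category dict built once, looked up once per token (objective: alternative).

-- ===== PORT A =====
-- the module constant REFLECTION_CATEGORIES, category by category
def catRetrieve : List String := ["[Retrieve:yes]", "[Retrieve:no]"]
def catREL : List String := ["[Relevant]", "[Irrelevant]"]
def catSUP : List String := ["[Fully supported]", "[Partially supported]", "[No support]"]
def catUSE : List String := ["[Utility:1]", "[Utility:2]", "[Utility:3]", "[Utility:4]", "[Utility:5]"]

-- A's `results` dict has the four fixed keys; its values are the state, kept as a 4-tuple of
-- Option String in key order. The inner `for key, valid_tokens in REFLECTION_CATEGORIES.items()`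
-- loop body, unrolled over the four fixed entries:
def stepA (s : Option String × Option String × Option String × Option String) (tok : String) :
    Option String × Option String × Option String × Option String :=
  let r1 := if s.1 = none ∧ tok ∈ catRetrieve then some tok else s.1
  let r2 := if s.2.1 = none ∧ tok ∈ catREL then some tok else s.2.1
  let r3 := if s.2.2.1 = none ∧ tok ∈ catSUP then some tok else s.2.2.1
  let r4 := if s.2.2.2 = none ∧ tok ∈ catUSE then some tok else s.2.2.2
  (r1, r2, r3, r4)

-- the fill-defaults loop: None becomes "[UNK]"
def fillA (o : Option String) : String :=
  match o with
  | none => "[UNK]"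
  | some t => t

def extract_reflection_fields (tokens : List String) : List (String × String) :=
  let s := tokens.foldl stepA (none, none, none, none)
  [("Retrieve", fillA s.1), ("isREL", fillA s.2.1), ("isSUP", fillA s.2.2.1), ("isUSE", fillA s.2.2.2)]

-- ===== PORT B =====
-- the module constant TOKEN_TO_CATEGORY: the dict comprehension over the literal
-- REFLECTION_CATEGORIES yields this literal token→category dict (all keys distinct)
def tok2cat : PySem.Dict String String := PySem.Dict.mk
  [("[Retrieve:yes]", "Retrieve"), ("[Retrieve:no]", "Retrieve"),
   ("[Relevant]", "isREL"), ("[Irrelevant]", "isREL"),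
   ("[Fully supported]", "isSUP"), ("[Partially supported]", "isSUP"), ("[No support]", "isSUP"),
   ("[Utility:1]", "isUSE"), ("[Utility:2]", "isUSE"), ("[Utility:3]", "isUSE"),
   ("[Utility:4]", "isUSE"), ("[Utility:5]", "isUSE")]

-- loop body: key = TOKEN_TO_CATEGORY.get(tok); if key is not None and key not in found: found[key] = tok
def stepB (found : PySem.Dict String String) (tok : String) : PySem.Dict String String :=
  match tok2cat.get? tok with
  | none => found
  | some key => if found.contains key then found else found.insert key tok

def extract_reflection_fields_alt (tokens : List String) : List (String × String) :=
  let found := tokens.foldl stepB PySem.Dict.empty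
  [("Retrieve", found.getD "Retrieve" "[UNK]"), ("isREL", found.getD "isREL" "[UNK]"),
   ("isSUP", found.getD "isSUP" "[UNK]"), ("isUSE", found.getD "isUSE" "[UNK]")]

-- ===== PRECONDITION & SPEC =====
def Spec_extract_reflection_fields (tokens : List String) (out : List (String × String)) : Prop := out = extract_reflection_fields_alt tokens
instance (tokens : List String) (out : List (String × String)) : Decidable (Spec_extract_reflection_fields tokens out) := by unfold Spec_extract_reflection_fields; infer_instance

-- ===== CLAIM (what is proved, stated in full; the proofs are below) =====
def Claim_equal_extract_reflection_fields : Prop := ∀ (tokens : List String), Dom_extract_reflection_fields tokens → Spec_extract_reflection_fields tokens (extract_reflection_fields tokens)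

-- ===== LEMMAS AND PROOFS =====

-- each slot of A's fold is its initial value if already set, else the first matching token
theorem foldA_fst (tokens : List String) (s : Option String × Option String × Option String × Option String) :
    (tokens.foldl stepA s).1 =
      (match s.1 with
       | some t => some t
       | none => tokens.find? (fun t => decide (t ∈ catRetrieve))) := by
  induction tokens generalizing s with
  | nil => cases h : s.1 <;> simp [h]
  | cons tok ts ih =>
    simp only [List.foldl_cons, ih, List.find?_cons]
    cases h : s.1 <;> simp [stepA, h] <;> split_ifs <;> simp_all

theorem foldA_snd1 (tokens : List String) (s : Option String × Option String × Option String × Option String) :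
    (tokens.foldl stepA s).2.1 =
      (match s.2.1 with
       | some t => some t
       | none => tokens.find? (fun t => decide (t ∈ catREL))) := by
  induction tokens generalizing s with
  | nil => cases h : s.2.1 <;> simp [h]
  | cons tok ts ih =>
    simp only [List.foldl_cons, ih, List.find?_cons]
    cases h : s.2.1 <;> simp [stepA, h] <;> split_ifs <;> simp_all

theorem foldA_snd2 (tokens : List String) (s : Option String × Option String × Option String × Option String) :
    (tokens.foldl stepA s).2.2.1 =
      (match s.2.2.1 with
       | some t => some t
       | none => tokens.find? (fun t => decide (t ∈ catSUP))) := by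
  induction tokens generalizing s with
  | nil => cases h : s.2.2.1 <;> simp [h]
  | cons tok ts ih =>
    simp only [List.foldl_cons, ih, List.find?_cons]
    cases h : s.2.2.1 <;> simp [stepA, h] <;> split_ifs <;> simp_all

theorem foldA_snd3 (tokens : List String) (s : Option String × Option String × Option String × Option String) :
    (tokens.foldl stepA s).2.2.2 =
      (match s.2.2.2 with
       | some t => some t
       | none => tokens.find? (fun t => decide (t ∈ catUSE))) := by
  induction tokens generalizing s with
  | nil => cases h : s.2.2.2 <;> simp [h]
  | cons tok ts ih =>
    simp only [List.foldl_cons, ih, List.find?_cons]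
    cases h : s.2.2.2 <;> simp [stepA, h] <;> split_ifs <;> simp_all

-- each key of B's fold: its previous value if already present, else the first token that
-- the inverted index maps to that key
theorem get?_mk_nil {kappa nu : Type} [BEq kappa] (x : kappa) :
    (PySem.Dict.mk ([] : List (kappa × nu))).get? x = none := rfl

theorem foldB_get? (tokens : List String) (found : PySem.Dict String String) (k : String) :
    (tokens.foldl stepB found).get? k =
      (match found.get? k with
       | some v => some v
       | none => tokens.find? (fun t => tok2cat.get? t == some k)) := by
  induction tokens generalizing found with
  | nil => cases h : found.get? k <;> simp [h]
  | cons tok ts ih =>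
    simp only [List.foldl_cons, ih, List.find?_cons, stepB]
    cases htc : tok2cat.get? tok with
    | none =>
      cases h : found.get? k <;> simp [h]
    | some key =>
      dsimp only
      by_cases hk : key = k
      · subst hk
        cases h : found.get? key with
        | some v =>
          have hc : found.contains key = true := by
            rw [PySem.Dict.contains_eq_isSome_get?, h]; rfl
          simp [hc, h]
        | none =>
          have hc : found.contains key = false := by
            rw [PySem.Dict.contains_eq_isSome_get?, h]; rfl
          simp [hc, h, PySem.Dict.get?_insert_self]
      · have hbk : (key == k) = false := by simp [hk]
        split_ifs with hc
        · cases h : found.get? k <;> simp [h, hbk]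
        · rw [PySem.Dict.get?_insert_of_ne found tok (fun e => hk e.symm)]
          cases h : found.get? k <;> simp [h, hbk]

-- a BEq-swap helper and a first-match characterisation of literal-dict lookup
theorem beq_swap (a t : String) : (a == t) = decide (t = a) := by
  by_cases h : t = a
  · simp [h]
  · have h' : ¬a = t := fun e => h e.symm
    simp [h, h']

theorem get?_mk_beq (l : List (String × String)) (t k : String)
    (hnd : (l.map Prod.fst).Nodup) :
    ((PySem.Dict.mk l).get? t == some k) = l.any (fun p => p.1 == t && p.2 == k) := by
  induction l with
  | nil => simp [get?_mk_nil]
  | cons a rest ih =>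
    obtain ⟨ha, hnd'⟩ := by simpa using hnd
    rw [show PySem.Dict.mk (a :: rest) = PySem.Dict.mk ((a.1, a.2) :: rest) by simp]
    rw [PySem.Dict.get?_mk_cons]
    by_cases h : a.1 = t
    · subst h
      have : rest.any (fun p => p.1 == a.1 && p.2 == k) = false := by
        simp only [List.any_eq_false, Bool.and_eq_true, beq_iff_eq, not_and]
        intro p hp hpt
        exact absurd (hpt ▸ List.mem_map_of_mem (f := Prod.fst) hp) (by simpa using ha)
      simp [this]
    · have hb : (a.1 == t) = false := by simp [h]
      simp [hb, ih hnd']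

-- the inverted index maps t to a category iff t is in that category's valid-token list
theorem tok2cat_Retrieve (t : String) :
    (tok2cat.get? t == some "Retrieve") = decide (t ∈ catRetrieve) := by
  rw [tok2cat, get?_mk_beq _ _ _ (by decide)]
  simp [catRetrieve, beq_swap]

theorem tok2cat_REL (t : String) :
    (tok2cat.get? t == some "isREL") = decide (t ∈ catREL) := by
  rw [tok2cat, get?_mk_beq _ _ _ (by decide)]
  simp [catREL, beq_swap]

theorem tok2cat_SUP (t : String) :
    (tok2cat.get? t == some "isSUP") = decide (t ∈ catSUP) := by
  rw [tok2cat, get?_mk_beq _ _ _ (by decide)]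
  simp [catSUP, beq_swap]

theorem tok2cat_USE (t : String) :
    (tok2cat.get? t == some "isUSE") = decide (t ∈ catUSE) := by
  rw [tok2cat, get?_mk_beq _ _ _ (by decide)]
  simp [catUSE, beq_swap]

-- a fold-result slot read with getD "[UNK]" equals fillA of the corresponding find?
theorem getD_foldB (tokens : List String) (k : String) (valid : List String)
    (hpred : ∀ t, (tok2cat.get? t == some k) = decide (t ∈ valid)) :
    (tokens.foldl stepB PySem.Dict.empty).getD k "[UNK]" =
      fillA (tokens.find? (fun t => decide (t ∈ valid))) := by
  rw [PySem.Dict.getD_eq_get?_getD, foldB_get? tokens PySem.Dict.empty k]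
  have : (fun t => tok2cat.get? t == some k) = (fun t => decide (t ∈ valid)) := funext hpred
  simp only [PySem.Dict.get?_empty, this]
  cases tokens.find? (fun t => decide (t ∈ valid)) <;> simp [fillA]

-- ===== VERDICT (by name: the statement is the Claim_ definition above) =====
theorem extract_reflection_fields_spec : Claim_equal_extract_reflection_fields := by
  intro tokens _
  unfold Spec_extract_reflection_fields extract_reflection_fields extract_reflection_fields_alt
  simp only [foldA_fst, foldA_snd1, foldA_snd2, foldA_snd3,
    getD_foldB tokens "Retrieve" catRetrieve tok2cat_Retrieve,
    getD_foldB tokens "isREL" catREL tok2cat_REL,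
    getD_foldB tokens "isSUP" catSUP tok2cat_SUP,
    getD_foldB tokens "isUSE" catUSE tok2cat_USE]
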